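-- pv_equiv track=rewrite | github.com/citiral/aoc | 2022/day14.py | calc_void
-- ===== SOURCE A (Python) =====
-- def calc_void(field):
--     void = {}
--     for val in field:
--         x, y = val
--         if x in void:
--             void[x] = max(void[x], y + 1)
--         else:
--             void[x] = y + 1
--     return void
-- ===== SOURCE B (Python) =====
-- def calc_void(field):
--     groups = {}
--     for x, y in field:
--         groups.setdefault(x, []).append(y)
--     return {x: max(ys) + 1 for x, ys in groups.items()}
-- ===== Notes on version B (the rewrite author's own statement) =====
-- stated objective: alternative
-- what changed: B first materializes a dict of all y-values grouped per x, then builds the result in a second pass as max(ys)+1 per group, instead of A's single pass keeping an online running maximum per key.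
import Mathlib
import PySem

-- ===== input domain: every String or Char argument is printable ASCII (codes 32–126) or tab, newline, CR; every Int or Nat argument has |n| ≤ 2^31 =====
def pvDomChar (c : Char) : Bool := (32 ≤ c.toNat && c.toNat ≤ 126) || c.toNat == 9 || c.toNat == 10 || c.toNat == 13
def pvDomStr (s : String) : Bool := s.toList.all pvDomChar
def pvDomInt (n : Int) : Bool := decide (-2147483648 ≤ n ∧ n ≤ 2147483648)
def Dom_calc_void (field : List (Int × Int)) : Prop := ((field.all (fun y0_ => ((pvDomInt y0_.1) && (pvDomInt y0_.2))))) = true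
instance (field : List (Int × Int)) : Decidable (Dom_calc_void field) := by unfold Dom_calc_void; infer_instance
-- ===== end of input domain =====

-- B groups all y-values per x first and then reduces each group with max(ys)+1, instead of
-- A's single online running-max pass; objective: alternative decomposition, same cost.

-- ===== PORT A =====
-- literal port of A: one dict, running max of y+1 per key, in insertion order
def calc_void (field : List (Int × Int)) : List (Int × Int) :=
  (field.foldl
    (fun void val =>
      if void.contains val.1 then
        void.insert val.1 (max (void.getD val.1 0) (val.2 + 1))
      else
        void.insert val.1 (val.2 + 1))
    (PySem.Dict.empty : PySem.Dict Int Int)).items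

-- ===== PORT B =====
-- literal port of Source B: groups.setdefault(x, []).append(y) mutates the stored list in place,
-- which is exactly Dict.modify x [] (· ++ [y]); then the dict comprehension maps max(ys)+1.
def calc_void_alt (field : List (Int × Int)) : List (Int × Int) :=
  let groups : PySem.Dict Int (List Int) :=
    field.foldl (fun g p => g.modify p.1 [] (fun ys => ys ++ [p.2])) PySem.Dict.empty
  groups.items.map (fun p => (p.1, (PySem.List.max? p.2 id).getD 0 + 1))

-- ===== PRECONDITION & SPEC =====
def Spec_calc_void (field : List (Int × Int)) (out : List (Int × Int)) : Prop := out = calc_void_alt field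
instance (field : List (Int × Int)) (out : List (Int × Int)) : Decidable (Spec_calc_void field out) := by unfold Spec_calc_void; infer_instance

-- ===== CLAIM (what is proved, stated in full; the proofs are below) =====
def Claim_equal_calc_void : Prop := ∀ (field : List (Int × Int)), Dom_calc_void field → Spec_calc_void field (calc_void field)

-- ===== LEMMAS AND PROOFS =====

-- the per-group reduction B applies to every grouped item
def pvF (p : Int × List Int) : Int × Int := (p.1, (PySem.List.max? p.2 id).getD 0 + 1)

-- max? of a nonempty list is some
theorem pvMaxSome (ys : List Int) (h : ys ≠ []) : ∃ m, PySem.List.max? ys id = some m := by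
  rcases ys with _ | ⟨a, as⟩
  · exact absurd rfl h
  · simp only [PySem.List.max?, List.foldl_cons]
    clear h
    induction as generalizing a with
    | nil => exact ⟨a, rfl⟩
    | cons b bs ih =>
      simp only [List.foldl_cons]
      split_ifs <;> exact ih _

-- appending one element to a nonempty group shifts the max as A's running max does
theorem pvMaxAppend (ys : List Int) (m y : Int) (h : PySem.List.max? ys id = some m) :
    (PySem.List.max? (ys ++ [y]) id).getD 0 + 1
      = max ((PySem.List.max? ys id).getD 0 + 1) (y + 1) := by
  simp only [PySem.List.max?] at h ⊢
  rw [List.foldl_append, h]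
  simp only [List.foldl_cons, List.foldl_nil, id_eq, Option.getD_some]
  split_ifs <;> simp only [Option.getD_some] <;> omega

-- keys of the grouped dict mapped through pvF are the group keys
theorem pvKeysMap (l : List (Int × List Int)) :
    (PySem.Dict.mk (l.map pvF)).keys = List.map (fun x => x.1) l := by
  rw [PySem.Dict.keys_mk, List.map_map]
  rfl

theorem pvContainsMap (g : PySem.Dict Int (List Int)) (x : Int) :
    (PySem.Dict.mk (g.items.map pvF)).contains x = g.contains x := by
  rw [PySem.Dict.contains_eq_decide_mem_keys, PySem.Dict.contains_eq_decide_mem_keys,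
    pvKeysMap]
  rfl

-- one loop step of A on the pvF-image of the groups equals the pvF-image of one step of B
theorem pvStep (g : PySem.Dict Int (List Int)) (hnd : g.keys.Nodup)
    (hne : ∀ p ∈ g.items, p.2 ≠ []) (x y : Int) :
    (if (PySem.Dict.mk (g.items.map pvF)).contains x then
        (PySem.Dict.mk (g.items.map pvF)).insert x
          (max ((PySem.Dict.mk (g.items.map pvF)).getD x 0) (y + 1))
      else (PySem.Dict.mk (g.items.map pvF)).insert x (y + 1))
      = PySem.Dict.mk ((g.modify x [] (fun ys => ys ++ [y])).items.map pvF) := by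
  have hmodify : g.modify x [] (fun ys => ys ++ [y]) = g.insert x (g.getD x [] ++ [y]) := rfl
  have hndm : (PySem.Dict.mk (g.items.map pvF)).keys.Nodup := by
    rw [pvKeysMap]; exact hnd
  rw [pvContainsMap, hmodify]
  by_cases hc : g.contains x = true
  · -- x already present: both sides overwrite the entry at x in place
    simp only [hc, if_true]
    have hxk : x ∈ g.keys := (PySem.Dict.contains_iff_mem_keys g x).mp hc
    obtain ⟨ys, hmem⟩ : ∃ ys, (x, ys) ∈ g.items := by
      obtain ⟨p, hp, hpx⟩ := List.mem_map.mp hxk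
      exact ⟨p.2, by rwa [show (x, p.2) = p from Prod.ext hpx.symm rfl]⟩
    have hys : g.getD x [] = ys := PySem.Dict.getD_of_mem_items g hmem hnd []
    have hmemF : (x, (PySem.List.max? ys id).getD 0 + 1) ∈ g.items.map pvF :=
      List.mem_map.mpr ⟨(x, ys), hmem, rfl⟩
    have hFd : (PySem.Dict.mk (g.items.map pvF)).getD x 0
        = (PySem.List.max? ys id).getD 0 + 1 :=
      PySem.Dict.getD_of_mem_items _ hmemF hndm 0
    have hcm : (PySem.Dict.mk (g.items.map pvF)).contains x = true := by
      rw [pvContainsMap]; exact hc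
    apply PySem.Dict.ext
    rw [PySem.Dict.items_insert_of_contains _ _ hcm,
      PySem.Dict.items_insert_of_contains _ _ hc]
    show List.map _ (g.items.map pvF) = List.map pvF (List.map _ g.items)
    rw [List.map_map, List.map_map]
    apply List.map_congr_left
    intro q hq
    by_cases hqx : q.1 = x
    · have hq2 : q.2 = ys := by
        have h1 := PySem.Dict.get?_of_mem_items g hmem hnd
        have h2 := PySem.Dict.get?_of_mem_items g (show (x, q.2) ∈ g.items by
          rwa [show (x, q.2) = q from Prod.ext hqx.symm rfl]) hnd
        rw [h1] at h2; exact (Option.some_injective _ h2).symm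
      obtain ⟨m, hm⟩ := pvMaxSome ys (hq2 ▸ hne q hq)
      simp only [Function.comp_apply, pvF, hqx, hys, beq_self_eq_true, if_true]
      exact Prod.ext rfl (by rw [hFd]; exact (pvMaxAppend ys m y hm).symm)
    · simp only [Function.comp_apply, pvF, beq_iff_eq, hqx, if_false]
  · -- x fresh: both sides append a new entry at the end
    have hc' : g.contains x = false := by simpa using hc
    simp only [hc', Bool.false_eq_true, if_false]
    have hcm : (PySem.Dict.mk (g.items.map pvF)).contains x = false := by
      rw [pvContainsMap]; exact hc'
    apply PySem.Dict.ext
    rw [PySem.Dict.items_insert_of_not_contains _ _ hcm,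
      PySem.Dict.getD_of_not_contains g [] hc',
      PySem.Dict.items_insert_of_not_contains _ _ hc']
    show g.items.map pvF ++ [(x, y + 1)] = List.map pvF (g.items ++ [(x, [] ++ [y])])
    rw [List.map_append]
    rfl

-- the whole-loop invariant: A's dict is the pvF-image of B's groups dict
theorem pvLoop (field : List (Int × Int)) :
    ∀ (g : PySem.Dict Int (List Int)), g.keys.Nodup → (∀ p ∈ g.items, p.2 ≠ []) →
    (field.foldl
      (fun void val =>
        if void.contains val.1 then
          void.insert val.1 (max (void.getD val.1 0) (val.2 + 1))
        else
          void.insert val.1 (val.2 + 1))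
      (PySem.Dict.mk (g.items.map pvF))).items
      = (field.foldl (fun g p => g.modify p.1 [] (fun ys => ys ++ [p.2])) g).items.map pvF := by
  induction field with
  | nil => intro g _ _; simp
  | cons hd tl ih =>
    intro g hnd hne
    rw [List.foldl_cons, List.foldl_cons, pvStep g hnd hne hd.1 hd.2]
    apply ih
    · rw [show g.modify hd.1 [] (fun ys => ys ++ [hd.2])
          = g.insert hd.1 (g.getD hd.1 [] ++ [hd.2]) from rfl]
      exact PySem.Dict.nodup_keys_insert g _ _ hnd
    · intro p hp
      rw [show g.modify hd.1 [] (fun ys => ys ++ [hd.2])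
          = g.insert hd.1 (g.getD hd.1 [] ++ [hd.2]) from rfl] at hp
      rcases (PySem.Dict.mem_items_insert g _ _ p).mp hp with h | ⟨h, _⟩
      · rw [h]; simp
      · exact hne p h

-- ===== VERDICT (by name: the statement is the Claim_ definition above) =====
theorem calc_void_spec : Claim_equal_calc_void := by
  intro field _
  show calc_void field = calc_void_alt field
  unfold calc_void calc_void_alt
  exact pvLoop field PySem.Dict.empty (by simp) (by simp [PySem.Dict.empty])
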